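-- pv_equiv track=rewrite | github.com/ParkSooYeong/4-2-Coding-with-Python | Practice/4-2-11-7 practice37.py | solution
-- ===== SOURCE A (Python) =====
-- def solution(attack, recovery, hp):
--
--     count = 0
--
--     for i in range(hp):
--
--         if i % 2 == 1:
--
--             hp -= attack
--             count += 1
--
--         if i % 2 == 0:
--
--             hp += recovery
--
--         if hp <= 0:
--
--             break
--
--     return count
-- ===== SOURCE B (Python) =====
-- def solution(attack, recovery, hp):
--     # O(1): find the first check index at which hp crosses 0 by ceiling division.
--     if hp <= 0:
--         return 0
--     d = attack - recovery
--     if d <= 0: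
--         return 0 if hp + recovery <= 0 else hp // 2
--     c1 = 2 * max(0, -((-(hp + recovery)) // d)) + 1
--     c2 = 2 * (-((-hp) // d))
--     return min(c1, c2, hp) // 2
-- ===== Notes on version B (the rewrite author's own statement) =====
-- stated objective: faster
-- what changed: B replaces A's per-iteration hp simulation with closed-form ceiling-division arithmetic that computes the first loop index at which hp crosses 0 (one candidate for the attack step and one for the recovery step) and derives the attack count from it.
import Mathlib
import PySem

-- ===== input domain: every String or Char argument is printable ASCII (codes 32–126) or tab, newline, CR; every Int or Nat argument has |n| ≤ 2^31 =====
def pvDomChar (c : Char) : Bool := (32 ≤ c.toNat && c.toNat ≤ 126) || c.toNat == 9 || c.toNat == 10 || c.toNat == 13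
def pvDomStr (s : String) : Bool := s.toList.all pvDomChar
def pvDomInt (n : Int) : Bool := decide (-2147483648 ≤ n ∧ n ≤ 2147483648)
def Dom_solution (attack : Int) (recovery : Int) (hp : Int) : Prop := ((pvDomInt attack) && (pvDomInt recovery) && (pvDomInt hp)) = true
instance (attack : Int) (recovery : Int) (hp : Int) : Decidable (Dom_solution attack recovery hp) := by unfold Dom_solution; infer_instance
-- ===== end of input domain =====

-- B replaces A's step-by-step hp simulation (O(hp)) by O(1) closed-form ceiling-division
-- arithmetic locating the first loop index at which hp crosses 0.

-- ===== PORT A =====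
-- the for-loop of A: iterates over the (fixed) index list, carrying (hp, count); early return on break
def solLoop (attack recovery : Int) : List Int → Int → Int → Int
  | [], _hp, count => count
  | i :: rest, hp, count =>
    let hp1 := if PySem.Int.mod i 2 = 1 then hp - attack else hp
    let count1 := if PySem.Int.mod i 2 = 1 then count + 1 else count
    let hp2 := if PySem.Int.mod i 2 = 0 then hp1 + recovery else hp1
    if hp2 ≤ 0 then count1 else solLoop attack recovery rest hp2 count1

def solution (attack : Int) (recovery : Int) (hp : Int) : Int :=
  solLoop attack recovery (PySem.List.pyRange 0 hp 1) hp 0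

-- ===== PORT B =====
def solution_alt (attack : Int) (recovery : Int) (hp : Int) : Int :=
  if hp ≤ 0 then 0
  else
    let d := attack - recovery
    if d ≤ 0 then
      if hp + recovery ≤ 0 then 0 else PySem.Int.floordiv hp 2
    else
      let c1 := 2 * max 0 (-(PySem.Int.floordiv (-(hp + recovery)) d)) + 1
      let c2 := 2 * (-(PySem.Int.floordiv (-hp) d))
      PySem.Int.floordiv (min (min c1 c2) hp) 2

-- ===== PRECONDITION & SPEC =====
def Spec_solution (attack : Int) (recovery : Int) (hp : Int) (out : Int) : Prop := out = solution_alt attack recovery hp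
instance (attack : Int) (recovery : Int) (hp : Int) (out : Int) : Decidable (Spec_solution attack recovery hp out) := by unfold Spec_solution; infer_instance

-- ===== CLAIM (what is proved, stated in full; the proofs are below) =====
def Claim_equal_solution : Prop := ∀ (attack : Int) (recovery : Int) (hp : Int), Dom_solution attack recovery hp → Spec_solution attack recovery hp (solution attack recovery hp)

-- ===== LEMMAS AND PROOFS =====

-- hp value of A's loop just before processing index i (i = 0 .. hp0):
-- after an even index A added recovery, after an odd index A subtracted attack.
def V (a r hp0 i : Int) : Int :=
  if i % 2 = 0 then hp0 - (i / 2) * (a - r) else hp0 + r - (i / 2) * (a - r)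

-- bracket form of ceiling division: q ≤ k ↔ x ≤ k*d
lemma ceil_le_iff (x d q k : Int) (hd : 0 < d) (h1 : (q - 1) * d < x) (h2 : x ≤ q * d) :
    q ≤ k ↔ x ≤ k * d := by
  constructor
  · intro h
    have : q * d ≤ k * d := mul_le_mul_of_nonneg_right h (le_of_lt hd)
    linarith
  · intro h
    by_contra hc
    rw [not_le] at hc
    have : k * d ≤ (q - 1) * d := mul_le_mul_of_nonneg_right (by omega) (le_of_lt hd)
    linarith

-- characterization of the break condition for d > 0
lemma V_le_zero_iff (a r hp0 i q1 q2 : Int) (hd : 0 < a - r)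
    (hq1a : (q1 - 1) * (a - r) < hp0 + r) (hq1b : hp0 + r ≤ q1 * (a - r))
    (hq2a : (q2 - 1) * (a - r) < hp0) (hq2b : hp0 ≤ q2 * (a - r)) :
    (V a r hp0 i ≤ 0 ↔ (i % 2 = 1 ∧ q1 ≤ i / 2) ∨ (i % 2 = 0 ∧ q2 ≤ i / 2)) := by
  unfold V
  by_cases hpc : i % 2 = 0
  · rw [if_pos hpc]
    constructor
    · intro h
      exact Or.inr ⟨hpc, (ceil_le_iff hp0 (a - r) q2 (i / 2) hd hq2a hq2b).mpr (by linarith)⟩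
    · rintro (⟨h1, _⟩ | ⟨_, h2⟩)
      · omega
      · have := (ceil_le_iff hp0 (a - r) q2 (i / 2) hd hq2a hq2b).mp h2
        linarith
  · rw [if_neg hpc]
    constructor
    · intro h
      exact Or.inl ⟨by omega, (ceil_le_iff (hp0 + r) (a - r) q1 (i / 2) hd hq1a hq1b).mpr (by linarith)⟩
    · rintro (⟨_, h⟩ | ⟨h0, _⟩)
      · have := (ceil_le_iff (hp0 + r) (a - r) q1 (i / 2) hd hq1a hq1b).mp h
        linarith
      · omega

-- B returns m/2 when m is the first index (1 ≤ m ≤ hp0) at which hp has crossed 0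
lemma break_lemma (a r hp0 m : Int) (h0 : 0 < hp0) (hm1 : 1 ≤ m) (hm2 : m ≤ hp0)
    (hVm : V a r hp0 m ≤ 0) (hmin : ∀ i, 1 ≤ i → i < m → 0 < V a r hp0 i) :
    solution_alt a r hp0 = m / 2 := by
  unfold solution_alt
  rw [if_neg (by omega)]
  by_cases hd : a - r ≤ 0
  · -- net hp never decreases over a full cycle: the only possible break is at index 1
    simp only [if_pos hd]
    have hm_odd : m % 2 = 1 ∧ hp0 + r ≤ 0 := by
      unfold V at hVm
      by_cases hp : m % 2 = 0
      · exfalso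
        rw [if_pos hp] at hVm
        have hk : 0 ≤ m / 2 := by omega
        nlinarith
      · rw [if_neg hp] at hVm
        have hk : 0 ≤ m / 2 := by omega
        refine ⟨by omega, ?_⟩
        nlinarith
    have hm_eq : m = 1 := by
      by_contra hne
      have h1 : 0 < V a r hp0 1 := hmin 1 le_rfl (by omega)
      unfold V at h1
      norm_num at h1
      omega
    rw [if_pos hm_odd.2, hm_eq]
    decide
  · rw [not_le] at hd
    rw [if_neg (by omega)]
    set q1 := -(PySem.Int.floordiv (-(hp0 + r)) (a - r)) with hq1
    set q2 := -(PySem.Int.floordiv (-hp0) (a - r)) with hq2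
    have hb1 : (q1 - 1) * (a - r) < hp0 + r ∧ hp0 + r ≤ q1 * (a - r) :=
      (PySem.Int.neg_floordiv_neg_eq_iff_of_pos hd).mp hq1.symm
    have hb2 : (q2 - 1) * (a - r) < hp0 ∧ hp0 ≤ q2 * (a - r) :=
      (PySem.Int.neg_floordiv_neg_eq_iff_of_pos hd).mp hq2.symm
    have hiff := fun i => V_le_zero_iff a r hp0 i q1 q2 hd hb1.1 hb1.2 hb2.1 hb2.2
    have hq2pos : 1 ≤ q2 := by
      by_contra hc
      rw [not_le] at hc
      have : q2 * (a - r) ≤ 0 * (a - r) := mul_le_mul_of_nonneg_right (by omega) (le_of_lt hd)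
      simp at this; omega
    set c1 := 2 * max 0 q1 + 1 with hc1
    set c2 := 2 * q2 with hc2
    -- c1 and c2 are break indices
    have hVc1 : V a r hp0 c1 ≤ 0 := by
      rw [hiff c1]
      exact Or.inl ⟨by omega, by omega⟩
    have hVc2 : V a r hp0 c2 ≤ 0 := by
      rw [hiff c2]
      exact Or.inr ⟨by omega, by omega⟩
    -- m is the least break index
    have hm_le_c1 : m ≤ c1 := by
      by_contra hc; rw [not_le] at hc
      exact absurd (hmin c1 (by omega) hc) (by simpa using hVc1)
    have hm_le_c2 : m ≤ c2 := by
      by_contra hc; rw [not_le] at hc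
      exact absurd (hmin c2 (by omega) hc) (by simpa using hVc2)
    have hge : min c1 c2 ≤ m := by
      rcases (hiff m).mp hVm with ⟨hodd, hk⟩ | ⟨heven, hk⟩
      · have : c1 ≤ m := by omega
        omega
      · have : c2 ≤ m := by omega
        omega
    have hmin_eq : min (min c1 c2) hp0 = m := by omega
    show PySem.Int.floordiv (min (min c1 c2) hp0) 2 = m / 2
    rw [hmin_eq, PySem.Int.floordiv_eq_ediv_of_pos (by omega : (0:Int) < 2)]

-- B returns hp0/2 when hp never crosses 0 during the hp0 iterations
lemma nobreak_lemma (a r hp0 : Int) (h0 : 0 < hp0)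
    (hall : ∀ i, 1 ≤ i → i ≤ hp0 → 0 < V a r hp0 i) :
    solution_alt a r hp0 = hp0 / 2 := by
  unfold solution_alt
  rw [if_neg (by omega)]
  by_cases hd : a - r ≤ 0
  · simp only [if_pos hd]
    have h1 : 0 < V a r hp0 1 := hall 1 le_rfl (by omega)
    unfold V at h1
    norm_num at h1
    rw [if_neg (by omega), PySem.Int.floordiv_eq_ediv_of_pos (by omega : (0:Int) < 2)]
  · rw [not_le] at hd
    rw [if_neg (by omega)]
    set q1 := -(PySem.Int.floordiv (-(hp0 + r)) (a - r)) with hq1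
    set q2 := -(PySem.Int.floordiv (-hp0) (a - r)) with hq2
    have hb1 : (q1 - 1) * (a - r) < hp0 + r ∧ hp0 + r ≤ q1 * (a - r) :=
      (PySem.Int.neg_floordiv_neg_eq_iff_of_pos hd).mp hq1.symm
    have hb2 : (q2 - 1) * (a - r) < hp0 ∧ hp0 ≤ q2 * (a - r) :=
      (PySem.Int.neg_floordiv_neg_eq_iff_of_pos hd).mp hq2.symm
    have hiff := fun i => V_le_zero_iff a r hp0 i q1 q2 hd hb1.1 hb1.2 hb2.1 hb2.2
    set c1 := 2 * max 0 q1 + 1 with hc1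
    set c2 := 2 * q2 with hc2
    have hq2pos : 1 ≤ q2 := by
      by_contra hc
      rw [not_le] at hc
      have : q2 * (a - r) ≤ 0 * (a - r) := mul_le_mul_of_nonneg_right (by omega) (le_of_lt hd)
      simp at this; omega
    have hVc1 : V a r hp0 c1 ≤ 0 := by
      rw [hiff c1]; exact Or.inl ⟨by omega, by omega⟩
    have hVc2 : V a r hp0 c2 ≤ 0 := by
      rw [hiff c2]; exact Or.inr ⟨by omega, by omega⟩
    have h1 : hp0 ≤ c1 := by
      by_contra hc; rw [not_le] at hc
      exact absurd (hall c1 (by omega) (by omega)) (by simpa using hVc1)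
    have h2 : hp0 ≤ c2 := by
      by_contra hc; rw [not_le] at hc
      exact absurd (hall c2 (by omega) (by omega)) (by simpa using hVc2)
    show PySem.Int.floordiv (min (min c1 c2) hp0) 2 = hp0 / 2
    rw [show min (min c1 c2) hp0 = hp0 by omega,
        PySem.Int.floordiv_eq_ediv_of_pos (by omega : (0:Int) < 2)]

-- the step of A's loop: entering index j with hp = V j and count = j/2, the updated state is V (j+1), (j+1)/2
lemma loop_run (a r hp0 : Int) (h0 : 0 < hp0) :
    ∀ n : Nat, ∀ j : Int, (hp0 - j).toNat = n → 0 ≤ j → j < hp0 →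
      (∀ i, 1 ≤ i → i ≤ j → 0 < V a r hp0 i) →
      solLoop a r (PySem.List.pyRange j hp0 1) (V a r hp0 j) (j / 2) = solution_alt a r hp0 := by
  intro n
  induction n using Nat.strong_induction_on with
  | _ n ih =>
    intro j hn hj0 hjlt hpre
    rw [PySem.List.pyRange_one_cons hjlt]
    simp only [solLoop]
    rw [PySem.Int.mod_eq_emod_of_pos (by omega : (0:Int) < 2)]
    have hstep : (if j % 2 = 1 then (if j % 2 = 0 then V a r hp0 j - a + r else V a r hp0 j - a)
        else (if j % 2 = 0 then V a r hp0 j + r else V a r hp0 j)) = V a r hp0 (j + 1) := by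
      unfold V
      by_cases hpar : j % 2 = 0
      · rw [if_neg (by omega), if_pos hpar, if_pos hpar,
            if_neg (by omega : ¬ (j + 1) % 2 = 0), show (j + 1) / 2 = j / 2 by omega]
        ring
      · rw [if_pos (by omega), if_neg hpar, if_neg hpar,
            if_pos (by omega : (j + 1) % 2 = 0), show (j + 1) / 2 = j / 2 + 1 by omega]
        ring
    have hcnt : (if j % 2 = 1 then j / 2 + 1 else j / 2) = (j + 1) / 2 := by
      by_cases hpar : j % 2 = 0
      · rw [if_neg (by omega)]; omega
      · rw [if_pos (by omega)]; omega
    by_cases hpar : j % 2 = 1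
    · simp only [if_pos hpar]
      have hpar0 : ¬ j % 2 = 0 := by omega
      simp only [if_neg hpar0]
      rw [if_pos hpar] at hstep hcnt
      rw [if_neg hpar0] at hstep
      by_cases hbrk : V a r hp0 (j + 1) ≤ 0
      · rw [if_pos (by omega : V a r hp0 j - a ≤ 0), hcnt]
        exact (break_lemma a r hp0 (j + 1) h0 (by omega) (by omega) hbrk
          (fun i h1 h2 => hpre i h1 (by omega))).symm
      · rw [if_neg (by omega : ¬ V a r hp0 j - a ≤ 0)]
        by_cases hend : j + 1 < hp0
        · rw [show V a r hp0 j - a = V a r hp0 (j + 1) from by omega,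
              show j / 2 + 1 = (j + 1) / 2 from by omega]
          exact ih (hp0 - (j + 1)).toNat (by omega) (j + 1) rfl (by omega) hend
            (fun i h1 h2 => by
              by_cases hij : i ≤ j
              · exact hpre i h1 hij
              · have : i = j + 1 := by omega
                subst this; omega)
        · have : PySem.List.pyRange (j + 1) hp0 1 = [] :=
            PySem.List.pyRange_one_eq_nil (by omega)
          rw [this]
          simp only [solLoop]
          rw [show j / 2 + 1 = hp0 / 2 from by omega]
          refine (nobreak_lemma a r hp0 h0 (fun i h1 h2 => ?_)).symm
          by_cases hij : i ≤ j
          · exact hpre i h1 hij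
          · have : i = j + 1 := by omega
            subst this; omega
    · have hpar0 : j % 2 = 0 := by omega
      simp only [if_neg hpar, if_pos hpar0]
      rw [if_neg hpar] at hcnt
      rw [if_neg hpar, if_pos hpar0] at hstep
      by_cases hbrk : V a r hp0 (j + 1) ≤ 0
      · rw [if_pos (by omega : V a r hp0 j + r ≤ 0), hcnt]
        exact (break_lemma a r hp0 (j + 1) h0 (by omega) (by omega) hbrk
          (fun i h1 h2 => hpre i h1 (by omega))).symm
      · rw [if_neg (by omega : ¬ V a r hp0 j + r ≤ 0)]
        by_cases hend : j + 1 < hp0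
        · rw [show V a r hp0 j + r = V a r hp0 (j + 1) from by omega, hcnt]
          exact ih (hp0 - (j + 1)).toNat (by omega) (j + 1) rfl (by omega) hend
            (fun i h1 h2 => by
              by_cases hij : i ≤ j
              · exact hpre i h1 hij
              · have : i = j + 1 := by omega
                subst this; omega)
        · have : PySem.List.pyRange (j + 1) hp0 1 = [] :=
            PySem.List.pyRange_one_eq_nil (by omega)
          rw [this]
          simp only [solLoop]
          rw [hcnt, show (j + 1) / 2 = hp0 / 2 from by omega]
          refine (nobreak_lemma a r hp0 h0 (fun i h1 h2 => ?_)).symm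
          by_cases hij : i ≤ j
          · exact hpre i h1 hij
          · have : i = j + 1 := by omega
            subst this; omega

-- ===== VERDICT (by name: the statement is the Claim_ definition above) =====
theorem solution_spec : Claim_equal_solution := by
  intro a r hp _
  unfold Spec_solution solution
  by_cases h0 : 0 < hp
  · have := loop_run a r hp h0 (hp - 0).toNat 0 rfl le_rfl h0 (by intro i h1 h2; omega)
    simpa [V] using this
  · rw [PySem.List.pyRange_one_eq_nil (by omega)]
    simp only [solLoop]
    unfold solution_alt
    rw [if_pos (by omega)]
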